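-- pv_equiv track=rewrite | github.com/ericpcode/Poker | preflop_range_calculator.py | calculate_top_range_str
-- ===== SOURCE A (Python) =====
-- from typing import List, Dict
--
-- hand_ranks = {
--     'AA': 1, 'KK': 2, 'QQ': 3, 'AKs': 4, 'JJ': 5, 'AQs': 6, 'KQs': 7, 'AJs': 8, 'KJs': 9, 'TT': 10,
--     'AKo': 11, 'ATs': 12, 'QJs': 13, 'KTs': 14, 'QTs': 15, 'JTs': 16, '99': 17, 'AQo': 18, 'A9s': 19, 'KQo': 20,
--     '88': 21, 'K9s': 22, 'T9s': 23, 'A8s': 24, 'Q9s': 25, 'J9s': 26, 'AJo': 27, 'A5s': 28, '77': 29, 'A7s': 30,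
--     'KJo': 31, 'A4s': 32, 'A3s': 33, 'A6s': 34, 'QJo': 35, '66': 36, 'K8s': 37, 'T8s': 38, 'A2s': 39, '98s': 40,
--     'J8s': 41, 'ATo': 42, 'Q8s': 43, 'K7s': 44, 'KTo': 45, '55': 46, 'JTo': 47, '87s': 48, 'QTo': 49, '44': 50,
--     '33': 51, '22': 52, 'K6s': 53, '97s': 54, 'K5s': 55, '76s': 56, 'T7s': 57, 'K4s': 58, 'K3s': 59, 'K2s': 60,
--     'Q7s': 61, '86s': 62, '65s': 63, 'J7s': 64, '54s': 65, 'Q6s': 66, '75s': 67, '96s': 68, 'Q5s': 69, '64s': 70,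
--     'Q4s': 71, 'Q3s': 72, 'T9o': 73, 'T6s': 74, 'Q2s': 75, 'A9o': 76, '53s': 77, '85s': 78, 'J6s': 79, 'J9o': 80,
--     'K9o': 81, 'J5s': 82, 'Q9o': 83, '43s': 84, '74s': 85, 'J4s': 86, 'J3s': 87, '95s': 88, 'J2s': 89, '63s': 90,
--     'A8o': 91, '52s': 92, 'T5s': 93, '84s': 94, 'T4s': 95, 'T3s': 96, '42s': 97, 'T2s': 98, '98o': 99, 'T8o': 100,
--     'A5o': 101, 'A7o': 102, '73s': 103, 'A4o': 104, '32s': 105, '94s': 106, '93s': 107, 'J8o': 108, 'A3o': 109, '62s': 110,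
--     '92s': 111, 'K8o': 112, 'A6o': 113, '87o': 114, 'Q8o': 115, '83s': 116, 'A2o': 117, '82s': 118, '97o': 119, '72s': 120,
--     '76o': 121, 'K7o': 122, '65o': 123, 'T7o': 124, 'K6o': 125, '86o': 126, '54o': 127, 'K5o': 128, 'J7o': 129, '75o': 130,
--     'Q7o': 131, 'K4o': 132, 'K3o': 133, 'K2o': 134, '96o': 135, '64o': 136, 'Q6o': 137, '53o': 138, '85o': 139, 'T6o': 140,
--     'Q5o': 141, '43o': 142, 'Q4o': 143, 'Q3o': 144, 'Q2o': 145, '74o': 146, 'J6o': 147, '63o': 148, 'J5o': 149, '95o': 150,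
--     '52o': 151, 'J4o': 152, 'J3o': 153, '42o': 154, 'J2o': 155, '84o': 156, 'T5o': 157, 'T4o': 158, '32o': 159, 'T3o': 160,
--     '73o': 161, 'T2o': 162, '62o': 163, '94o': 164, '93o': 165, '92o': 166, '83o': 167, '82o': 168, '72o': 169
-- }
--
-- def generate_two_card_hands() -> List[str]:
--     ranks = ['A', 'K', 'Q', 'J', 'T', '9', '8', '7', '6', '5', '4', '3', '2']
--     suits = ['s', 'o']
--     two_card_hands = []
--
--     for i in range(len(ranks)):
--         for j in range(len(ranks)):
--             if ranks.index(ranks[i]) == ranks.index(ranks[j]):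
--                 hand = ranks[i] + ranks[j]
--             elif ranks.index(ranks[i]) < ranks.index(ranks[j]):
--                 hand = ranks[i] + ranks[j] + suits[0]
--             elif ranks.index(ranks[i]) > ranks.index(ranks[j]):
--                 hand = ranks[j] + ranks[i] + suits[1]
--             two_card_hands.append(hand)
--     return two_card_hands
--
-- def hand_strength(hand_string: str) -> int:
--     return hand_ranks.get(hand_string, 170)
--
-- def calculate_top_range_str(percentage: int) -> List[str]:
--     all_hand_str = generate_two_card_hands()
--     num_hands = 1326
--     count = 0
--     num_hands_to_play = int(num_hands * percentage/100)
--
--     sorted_hands = sorted(all_hand_str, key=lambda hand: hand_strength(hand), reverse=False)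
--     top_hands = []
--
--     for hand in sorted_hands:
--         top_hands.append(hand)
--         if count >= num_hands_to_play:
--             break
--         elif len(hand) == 2: # If pair, 6 combinations
--             count+=6
--         elif hand[2] == "s": # If suited, 4 combinations
--             count+=4
--         elif hand[2] == "o": # If offsuit, 12 combinations
--             count+=12
--     return top_hands
-- ===== SOURCE B (Python) =====
-- from itertools import accumulate
-- from typing import List
--
-- # The 169 preflop hand classes in strength order (rank 1 first), as a flat table.
-- RANKED: List[str] = (
--     "AA KK QQ AKs JJ AQs KQs AJs KJs TT AKo ATs QJs KTs QTs JTs 99 AQo A9s KQo "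
--     "88 K9s T9s A8s Q9s J9s AJo A5s 77 A7s KJo A4s A3s A6s QJo 66 K8s T8s A2s 98s "
--     "J8s ATo Q8s K7s KTo 55 JTo 87s QTo 44 33 22 K6s 97s K5s 76s T7s K4s K3s K2s "
--     "Q7s 86s 65s J7s 54s Q6s 75s 96s Q5s 64s Q4s Q3s T9o T6s Q2s A9o 53s 85s J6s J9o "
--     "K9o J5s Q9o 43s 74s J4s J3s 95s J2s 63s A8o 52s T5s 84s T4s T3s 42s T2s 98o T8o "
--     "A5o A7o 73s A4o 32s 94s 93s J8o A3o 62s 92s K8o A6o 87o Q8o 83s A2o 82s 97o 72s "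
--     "76o K7o 65o T7o K6o 86o 54o K5o J7o 75o Q7o K4o K3o K2o 96o 64o Q6o 53o 85o T6o "
--     "Q5o 43o Q4o Q3o Q2o 74o J6o 63o J5o 95o 52o J4o J3o 42o J2o 84o T5o T4o 32o T3o "
--     "73o T2o 62o 94o 93o 92o 83o 82o 72o"
-- ).split()
--
-- def calculate_top_range_str(percentage: int) -> List[str]:
--     weights = [6 if len(h) == 2 else 4 if h[2] == 's' else 12 for h in RANKED]
--     threshold = 1326 * percentage // 100
--     # prefix[i] = combos of hands strictly before index i; include hands up to the
--     # first index whose preceding weight already meets the threshold.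
--     prefix = [0] + list(accumulate(weights))
--     m = next((i for i, c in enumerate(prefix[:-1]) if c >= threshold), len(RANKED) - 1)
--     return RANKED[:m + 1]
-- ===== Notes on version B (the rewrite author's own statement) =====
-- stated objective: alternative
-- what changed: Replaces A's generate-all-hands-then-sort-then-stateful-break-loop with a flat strength-ordered lookup table (one split string) plus a declarative pipeline: per-hand combination weights, a prefix sum with itertools.accumulate, locating the first index whose preceding cumulative count meets the threshold, and returning one slice.
import Mathlib
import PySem

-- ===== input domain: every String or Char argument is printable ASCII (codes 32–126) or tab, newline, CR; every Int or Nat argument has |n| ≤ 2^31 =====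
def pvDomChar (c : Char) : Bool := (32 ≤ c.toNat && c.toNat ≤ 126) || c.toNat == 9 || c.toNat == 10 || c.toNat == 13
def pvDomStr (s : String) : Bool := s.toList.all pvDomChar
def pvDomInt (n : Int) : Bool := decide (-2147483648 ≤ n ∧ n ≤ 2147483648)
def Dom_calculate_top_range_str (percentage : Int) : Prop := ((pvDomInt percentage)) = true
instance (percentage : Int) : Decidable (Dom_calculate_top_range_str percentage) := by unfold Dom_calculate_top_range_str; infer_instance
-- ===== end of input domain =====

-- B replaces A's generate-sort-then-stateful-break-loop with a flat strength-ordered table,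
-- a prefix-sum of combination weights and one slice (objective: alternative, same cost).

-- ===== PORT A =====
def pvRanksA : List String := ["A", "K", "Q", "J", "T", "9", "8", "7", "6", "5", "4", "3", "2"]

def pvSuitsA : List String := ["s", "o"]

-- generate_two_card_hands: the double loop over range(len(ranks)); ranks.index(…) always
-- succeeds here (every ranks[i] is in ranks), ported as index? with getD 0.  The Python
-- if/elif/elif chain is exhaustive by trichotomy of the two indices, so the third test
-- becomes the final else.
def generate_two_card_hands : List String :=
  (PySem.List.pyRange 0 (PySem.List.len pvRanksA) 1).foldl (fun acc i =>
    (PySem.List.pyRange 0 (PySem.List.len pvRanksA) 1).foldl (fun acc j =>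
      let ri := PySem.List.pyGetD pvRanksA i ""
      let rj := PySem.List.pyGetD pvRanksA j ""
      let ii := (PySem.List.index? pvRanksA ri).getD 0
      let jj := (PySem.List.index? pvRanksA rj).getD 0
      let hand :=
        if ii = jj then ri ++ rj
        else if ii < jj then ri ++ rj ++ PySem.List.pyGetD pvSuitsA 0 ""
        else rj ++ ri ++ PySem.List.pyGetD pvSuitsA 1 ""
      acc ++ [hand]) acc) []

def pvHandRanksA : PySem.Dict String Int := PySem.Dict.ofList [("AA", 1), ("KK", 2), ("QQ", 3), ("AKs", 4), ("JJ", 5), ("AQs", 6), ("KQs", 7), ("AJs", 8), ("KJs", 9), ("TT", 10), ("AKo", 11), ("ATs", 12), ("QJs", 13), ("KTs", 14), ("QTs", 15), ("JTs", 16), ("99", 17), ("AQo", 18), ("A9s", 19), ("KQo", 20), ("88", 21), ("K9s", 22), ("T9s", 23), ("A8s", 24), ("Q9s", 25), ("J9s", 26), ("AJo", 27), ("A5s", 28), ("77", 29), ("A7s", 30), ("KJo", 31), ("A4s", 32), ("A3s", 33), ("A6s", 34), ("QJo", 35), ("66", 36), ("K8s", 37), ("T8s", 38), ("A2s", 39),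 ("98s", 40), ("J8s", 41), ("ATo", 42), ("Q8s", 43), ("K7s", 44), ("KTo", 45), ("55", 46), ("JTo", 47), ("87s", 48), ("QTo", 49), ("44", 50), ("33", 51), ("22", 52), ("K6s", 53), ("97s", 54), ("K5s", 55), ("76s", 56), ("T7s", 57), ("K4s", 58), ("K3s", 59), ("K2s", 60), ("Q7s", 61), ("86s", 62), ("65s", 63), ("J7s", 64), ("54s", 65), ("Q6s", 66), ("75s", 67), ("96s", 68), ("Q5s", 69), ("64s", 70), ("Q4s", 71), ("Q3s", 72), ("T9o", 73), ("T6s", 74), ("Q2s", 75), ("A9o", 76), ("53s", 77), ("85s", 78), ("J6s", 79), ("J9o", 80), ("K9o", 81), ("J5s", 82), ("Q9o", 83), ("43s", 84), ("74s", 85), ("J4s", 86), ("J3s", 87), ("95s", 88), ("J2s", 89), ("63s", 90), ("A8o", 91), ("52s", 92), ("T5s", 93), ("84s", 94), ("T4s", 95), ("T3s", 96), ("42s", 97), ("T2s", 98), ("98o", 99), ("T8o", 100), ("A5o", 101), ("A7o", 102), ("73s", 103), ("A4o", 104), ("32s", 105), ("94s", 106), ("93s", 107), ("J8o", 108), ("A3o",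 109), ("62s", 110), ("92s", 111), ("K8o", 112), ("A6o", 113), ("87o", 114), ("Q8o", 115), ("83s", 116), ("A2o", 117), ("82s", 118), ("97o", 119), ("72s", 120), ("76o", 121), ("K7o", 122), ("65o", 123), ("T7o", 124), ("K6o", 125), ("86o", 126), ("54o", 127), ("K5o", 128), ("J7o", 129), ("75o", 130), ("Q7o", 131), ("K4o", 132), ("K3o", 133), ("K2o", 134), ("96o", 135), ("64o", 136), ("Q6o", 137), ("53o", 138), ("85o", 139), ("T6o", 140), ("Q5o", 141), ("43o", 142), ("Q4o", 143), ("Q3o", 144), ("Q2o", 145), ("74o", 146), ("J6o", 147), ("63o", 148), ("J5o", 149), ("95o", 150), ("52o", 151), ("J4o", 152), ("J3o", 153), ("42o", 154), ("J2o", 155), ("84o", 156), ("T5o", 157), ("T4o", 158), ("32o", 159), ("T3o", 160), ("73o", 161), ("T2o", 162), ("62o", 163), ("94o", 164), ("93o", 165), ("92o", 166), ("83o", 167), ("82o", 168), ("72o", 169)]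

def hand_strength (hand_string : String) : Int := PySem.Dict.getD pvHandRanksA hand_string 170

-- the for-loop of calculate_top_range_str: append the hand, then break / bump count
def pvLoopA : List String → Int → Int → List String
  | [], _, _ => []
  | hand :: rest, count, num_hands_to_play =>
      hand ::
        (if count ≥ num_hands_to_play then []
         else if PySem.Str.len hand = 2 then pvLoopA rest (count + 6) num_hands_to_play
         else if PySem.Str.pyGet? hand 2 = some 's' then pvLoopA rest (count + 4) num_hands_to_play
         else if PySem.Str.pyGet? hand 2 = some 'o' then pvLoopA rest (count + 12) num_hands_to_play
         else pvLoopA rest count num_hands_to_play)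

-- int(num_hands * percentage/100) truncates the float quotient; on |percentage| ≤ 2^31 this
-- equals integer truncating division (1326*percentage is float-exact; the /100 rounding
-- error, < 4e-4, never crosses an integer), ported as truncdiv.
def calculate_top_range_str (percentage : Int) : List String :=
  let all_hand_str := generate_two_card_hands
  let num_hands : Int := 1326
  let num_hands_to_play := PySem.Int.truncdiv (num_hands * percentage) 100
  let sorted_hands := PySem.List.sorted all_hand_str (fun hand => hand_strength hand) false
  pvLoopA sorted_hands 0 num_hands_to_play

-- ===== PORT B =====
-- B's table: the 169 hand classes in strength order as one whitespace-separated string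
def pvRankedStrB : String := "AA KK QQ AKs JJ AQs KQs AJs KJs TT AKo ATs QJs KTs QTs JTs 99 AQo A9s KQo 88 K9s T9s A8s Q9s J9s AJo A5s 77 A7s KJo A4s A3s A6s QJo 66 K8s T8s A2s 98s J8s ATo Q8s K7s KTo 55 JTo 87s QTo 44 33 22 K6s 97s K5s 76s T7s K4s K3s K2s Q7s 86s 65s J7s 54s Q6s 75s 96s Q5s 64s Q4s Q3s T9o T6s Q2s A9o 53s 85s J6s J9o K9o J5s Q9o 43s 74s J4s J3s 95s J2s 63s A8o 52s T5s 84s T4s T3s 42s T2s 98o T8o A5o A7o 73s A4o 32s 94s 93s J8o A3o 62s 92s K8o A6o 87o Q8o 83s A2o 82s 97o 72s 76o K7o 65o T7o K6o 86o 54o K5o J7o 75o Q7o K4o K3o K2o 96o 64o Q6o 53o 85o T6o Q5o 43o Q4o Q3o Q2o 74o J6o 63o J5o 95o 52o J4o J3o 42o J2o 84o T5o T4o 32o T3o 73o T2o 62o 94o 93o 92o 83o 82o 72o"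

-- B's weight comprehension: 6 if len(h) == 2 else 4 if h[2] == 's' else 12
def pvWeightB (h : String) : Int :=
  if PySem.Str.len h = 2 then 6 else if PySem.Str.pyGet? h 2 = some 's' then 4 else 12

-- RANKED = "…".split() is split₀; [0]+accumulate(weights) is List.scanl (+) 0;
-- next(…, default) over enumerate(prefix[:-1]) is findIdx? on dropLast with getD.
def calculate_top_range_str_alt (percentage : Int) : List String :=
  let ranked := PySem.Str.split₀ pvRankedStrB
  let weights := ranked.map pvWeightB
  let threshold := PySem.Int.floordiv (1326 * percentage) 100
  let prefixSums := List.scanl (· + ·) (0 : Int) weights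
  let m := ((prefixSums.dropLast).findIdx? (fun c => decide (c ≥ threshold))).getD (ranked.length - 1)
  ranked.take (m + 1)

-- ===== PRECONDITION & SPEC =====
def Spec_calculate_top_range_str (percentage : Int) (out : List String) : Prop := out = calculate_top_range_str_alt percentage
instance (percentage : Int) (out : List String) : Decidable (Spec_calculate_top_range_str percentage out) := by unfold Spec_calculate_top_range_str; infer_instance

-- ===== CLAIM (what is proved, stated in full; the proofs are below) =====
def Claim_equal_calculate_top_range_str : Prop := ∀ (percentage : Int), Dom_calculate_top_range_str percentage → Spec_calculate_top_range_str percentage (calculate_top_range_str percentage)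

-- ===== LEMMAS AND PROOFS =====

-- the 169 hands in rank order (= B's split table = A's sorted list)
def pvRanked : List String := ["AA", "KK", "QQ", "AKs", "JJ", "AQs", "KQs", "AJs", "KJs", "TT", "AKo", "ATs", "QJs", "KTs", "QTs", "JTs", "99", "AQo", "A9s", "KQo", "88", "K9s", "T9s", "A8s", "Q9s", "J9s", "AJo", "A5s", "77", "A7s", "KJo", "A4s", "A3s", "A6s", "QJo", "66", "K8s", "T8s", "A2s", "98s", "J8s", "ATo", "Q8s", "K7s", "KTo", "55", "JTo", "87s", "QTo", "44", "33", "22", "K6s", "97s", "K5s", "76s", "T7s", "K4s", "K3s", "K2s", "Q7s", "86s", "65s", "J7s", "54s", "Q6s", "75s", "96s", "Q5s", "64s", "Q4s", "Q3s", "T9o", "T6s", "Q2s", "A9o", "53s", "85s", "J6s", "J9o", "K9o", "J5s", "Q9o", "43s", "74s", "J4s", "J3s", "95s", "J2s", "63s", "A8o", "52s", "T5s", "84s", "T4s", "T3s", "42s", "T2s", "98o", "T8o", "A5o", "A7o", "73s", "A4o", "32s", "94s", "93s", "J8o", "A3o", "62s", "92s", "K8o", "A6o", "87o", "Q8o", "83s",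 "A2o", "82s", "97o", "72s", "76o", "K7o", "65o", "T7o", "K6o", "86o", "54o", "K5o", "J7o", "75o", "Q7o", "K4o", "K3o", "K2o", "96o", "64o", "Q6o", "53o", "85o", "T6o", "Q5o", "43o", "Q4o", "Q3o", "Q2o", "74o", "J6o", "63o", "J5o", "95o", "52o", "J4o", "J3o", "42o", "J2o", "84o", "T5o", "T4o", "32o", "T3o", "73o", "T2o", "62o", "94o", "93o", "92o", "83o", "82o", "72o"]

-- every ranked hand is a pair, suited or offsuit
def pvOk (h : String) : Bool :=
  (PySem.Str.len h == 2) || (PySem.Str.pyGet? h 2 == some 's') || (PySem.Str.pyGet? h 2 == some 'o')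

set_option maxRecDepth 400000 in
lemma pvRanked_ok : ∀ h ∈ pvRanked, pvOk h = true := by decide

set_option maxRecDepth 400000 in
lemma pvRanked_map_strength :
    pvRanked.map hand_strength = (List.range 169).map (fun k => (k : Int) + 1) := by decide

set_option maxRecDepth 400000 in
lemma pvRanked_perm : pvRanked.Perm generate_two_card_hands := by decide

set_option maxRecDepth 400000 in
lemma range_succ_pairwise : ((List.range 169).map (fun k => (k : Int) + 1)).Pairwise (· < ·) := by
  decide

lemma pvRanked_pairwise : pvRanked.Pairwise (fun a b => hand_strength a < hand_strength b) := by
  have h1 : (pvRanked.map hand_strength).Pairwise (· < ·) := by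
    rw [pvRanked_map_strength]; exact range_succ_pairwise
  exact List.pairwise_map.mp h1

lemma sortedA_eq :
    PySem.List.sorted generate_two_card_hands (fun hand => hand_strength hand) false = pvRanked :=
  PySem.List.sorted_eq_of_perm_of_pairwise_lt _ _ _ pvRanked_perm pvRanked_pairwise

set_option maxRecDepth 1000000 in
set_option maxHeartbeats 16000000 in
lemma splitB_eq : PySem.Str.split₀ pvRankedStrB = pvRanked := by decide

-- one non-break step of A's loop adds exactly B's weight
lemma loopA_cons (h : String) (rest : List String) (c n : Int)
    (hw : pvOk h = true) (hc : ¬ c ≥ n) :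
    pvLoopA (h :: rest) c n = h :: pvLoopA rest (c + pvWeightB h) n := by
  unfold pvOk at hw
  conv_lhs => rw [pvLoopA]
  rw [if_neg hc]
  congr 1
  unfold pvWeightB
  split_ifs with h2 hs ho
  · rfl
  · rfl
  · rfl
  · simp only [Bool.or_eq_true, beq_iff_eq] at hw
    tauto

-- A's break-loop is take of (first index whose preceding cumulative weight meets n) + 1
lemma loopA_eq_take (L : List String) (c n : Int) (hok : ∀ h ∈ L, pvOk h = true) :
    pvLoopA L c n =
      L.take ((((List.scanl (· + ·) c (L.map pvWeightB)).dropLast).findIdx?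
                (fun x => decide (x ≥ n))).getD (L.length - 1) + 1) := by
  induction L generalizing c with
  | nil => simp [pvLoopA]
  | cons h rest ih =>
    have hw : pvOk h = true := hok h (by simp)
    have hrest : ∀ x ∈ rest, pvOk x = true := fun x hx => hok x (by simp [hx])
    have hne : List.scanl (· + ·) (c + pvWeightB h) (rest.map pvWeightB) ≠ [] :=
      List.scanl_ne_nil
    rw [List.map_cons, List.scanl_cons, List.dropLast_cons_of_ne_nil hne,
      List.findIdx?_cons]
    by_cases hc : c ≥ n
    · rw [if_pos (by simpa using hc)]
      simp [pvLoopA, hc]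
    · rw [if_neg (by simpa using hc), loopA_cons h rest c n hw hc, ih _ hrest]
      cases hidx : ((List.scanl (· + ·) (c + pvWeightB h) (rest.map pvWeightB)).dropLast).findIdx?
          (fun x => decide (x ≥ n)) with
      | some k => simp
      | none =>
        cases rest with
        | nil => simp
        | cons r rs => simp

-- tdiv of a nonneg numerator by 100 is floordiv
lemma trunc_eq_floor_of_nonneg (a : Int) (ha : 0 ≤ a) :
    PySem.Int.truncdiv a 100 = PySem.Int.floordiv a 100 := by
  rw [PySem.Int.floordiv_eq_ediv_of_pos (by norm_num)]
  show a.tdiv 100 = a / 100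
  rw [Int.tdiv_eq_ediv]
  simp [ha]

lemma tdiv_nonpos_100 (a : Int) (h : a ≤ 0) : a.tdiv 100 ≤ 0 := by
  rw [Int.tdiv_eq_ediv]
  have h1 : a / 100 ≤ 0 := by simpa using Int.ediv_le_ediv (c := 100) (by norm_num) h
  have h2 : (100 : Int).sign = 1 := by decide
  split_ifs <;> omega

lemma floordiv_nonpos_100 (a : Int) (h : a ≤ 0) : PySem.Int.floordiv a 100 ≤ 0 := by
  rw [PySem.Int.floordiv_eq_ediv_of_pos (by norm_num)]
  simpa using Int.ediv_le_ediv (c := 100) (by norm_num) h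

-- a nonpositive threshold stops at the very first hand
lemma firstIdx_of_nonpos (ws : List Int) (n : Int) (d : Nat) (hws : ws ≠ []) (hn : n ≤ 0) :
    (((List.scanl (· + ·) (0 : Int) ws).dropLast).findIdx?
      (fun x => decide (x ≥ n))).getD d = 0 := by
  cases ws with
  | nil => exact absurd rfl hws
  | cons w ws =>
    rw [List.scanl_cons, List.dropLast_cons_of_ne_nil List.scanl_ne_nil, List.findIdx?_cons]
    rw [if_pos (by simpa using hn)]
    rfl

-- ===== VERDICT (by name: the statement is the Claim_ definition above) =====
theorem calculate_top_range_str_spec : Claim_equal_calculate_top_range_str := by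
  intro p _
  unfold Spec_calculate_top_range_str
  simp only [calculate_top_range_str, calculate_top_range_str_alt]
  rw [sortedA_eq, splitB_eq]
  rw [loopA_eq_take pvRanked 0 _ pvRanked_ok]
  by_cases hp : 0 ≤ 1326 * p
  · rw [trunc_eq_floor_of_nonneg _ hp]
  · have hA : PySem.Int.truncdiv (1326 * p) 100 ≤ 0 := tdiv_nonpos_100 _ (le_of_lt (not_le.mp hp))
    have hB : PySem.Int.floordiv (1326 * p) 100 ≤ 0 := floordiv_nonpos_100 _ (le_of_lt (not_le.mp hp))
    have hws : pvRanked.map pvWeightB ≠ [] := by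
      rw [show pvRanked = "AA" :: pvRanked.tail from rfl, List.map_cons]
      exact List.cons_ne_nil _ _
    rw [firstIdx_of_nonpos _ _ _ hws hA, firstIdx_of_nonpos _ _ _ hws hB]
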